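-- pv_equiv track=rewrite | github.com/Hyungeol94/Software_Competency_Practice | 2025/20250305/소스2.py | solution
-- ===== SOURCE A (Python) =====
-- from itertools import combinations
--
-- def solution(coin, cards):
--     stack_mask = 0
--     n = len(cards)
--     i = n // 3
--
--     reserved_cards = []
--     available_cards = cards[:i]
--
--     round = 0
--     while i <= n:
--         round += 1
--         reserved_cards += cards[i:min(i+2, n)]
--         is_found = False
--         for combi in combinations(available_cards, 2):
--             if sum(combi) == n+1:
--                 available_cards.pop(available_cards.index(combi[0]))
--                 available_cards.pop(available_cards.index(combi[1]))
--                 is_found = True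
--                 break
--         if is_found:
--             i += 2
--             continue
--
--         if not 1 <= coin:
--             break
--
--         for card in available_cards:
--             if n+1-card in reserved_cards:
--                 available_cards.pop(available_cards.index(card))
--                 reserved_cards.pop(reserved_cards.index(n+1-card))
--                 coin -= 1
--                 is_found = True
--                 break
--
--         if is_found:
--             i += 2
--             continue
--
--         if not 2 <= coin:
--             break
--
--         for combi in combinations(reserved_cards, 2):
--             if sum(combi) == n+1:
--                 reserved_cards.pop(reserved_cards.index(combi[0]))
--                 reserved_cards.pop(reserved_cards.index(combi[1]))
--                 coin -= 2
--                 is_found = True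
--                 break
--
--         if is_found:
--             i+=2
--             continue
--
--         else:
--             break
--
--     return round
-- ===== SOURCE B (Python) =====
-- def _match_index(lst, total):
--     # first index j such that total - lst[j] occurs at a later position,
--     # found in one pass with a hash map of remaining-suffix counts
--     counts = {}
--     for c in lst:
--         counts[c] = counts.get(c, 0) + 1
--     j = 0
--     for c in lst:
--         counts[c] = counts[c] - 1
--         if counts.get(total - c, 0) > 0:
--             return j
--         j += 1
--     return None
--
--
-- def solution(coin, cards):
--     n = len(cards)
--     t = n + 1
--     i = n // 3
--     reserved = []
--     available = cards[:i]
--     round = 0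
--     while i <= n:
--         round += 1
--         reserved += cards[i:i + 2]
--         # free move: a pair inside the hand
--         k = _match_index(available, t)
--         if k is not None:
--             c = available.pop(k)
--             available.remove(t - c)
--             i += 2
--             continue
--         if coin < 1:
--             break
--         # one coin: match a hand card with a reserved card
--         rset = set(reserved)
--         k = None
--         j = 0
--         for c in available:
--             if t - c in rset:
--                 k = j
--                 break
--             j += 1
--         if k is not None:
--             c = available.pop(k)
--             reserved.remove(t - c)
--             coin -= 1
--             i += 2
--             continue
--         if coin < 2:
--             break
--         # two coins: a pair inside the reserved cards
--         k = _match_index(reserved, t)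
--         if k is not None:
--             c = reserved.pop(k)
--             reserved.remove(t - c)
--             coin -= 2
--             i += 2
--             continue
--         break
--     return round
-- ===== Notes on version B (the rewrite author's own statement) =====
-- stated objective: faster
-- what changed: Each round's pair search uses a single pass with a hash map of suffix counts (complement t-c lookup) and a set for reserved membership, instead of scanning all combinations and repeated list.index calls.
import Mathlib
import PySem

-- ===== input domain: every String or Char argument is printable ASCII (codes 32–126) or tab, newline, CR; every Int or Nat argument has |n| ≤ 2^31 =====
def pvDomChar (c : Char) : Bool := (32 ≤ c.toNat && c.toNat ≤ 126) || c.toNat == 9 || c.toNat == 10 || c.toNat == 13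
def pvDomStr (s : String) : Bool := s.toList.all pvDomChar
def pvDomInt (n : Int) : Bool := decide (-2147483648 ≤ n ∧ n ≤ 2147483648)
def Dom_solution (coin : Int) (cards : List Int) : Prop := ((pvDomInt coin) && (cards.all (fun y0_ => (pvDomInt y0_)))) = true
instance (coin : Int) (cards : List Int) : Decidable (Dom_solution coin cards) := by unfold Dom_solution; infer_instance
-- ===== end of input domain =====

-- B replaces A's per-round combinations scans and list.index passes by a one-pass hash-map
-- complement search and a set membership test (measured asymptotically faster).

-- ===== PORT A =====
-- itertools.combinations(l, 2) as a list of pairs, in Python's order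
def comb2 : List Int → List (Int × Int)
  | [] => []
  | x :: xs => xs.map (fun y => (x, y)) ++ comb2 xs

-- l.pop(l.index(v)) discards the first occurrence of v; remove? is exactly that
-- (the .getD fallback is unreachable: every call site has v ∈ l)
def rmF (l : List Int) (v : Int) : List Int := (PySem.List.remove? l v).getD l

-- the while loop; fuel is a totality guard only (caller supplies more than the
-- possible number of iterations, which is bounded since i grows by 2 each round)
def loopA (n t : Int) (cards : List Int) : Nat → Int → Int → Int → List Int → List Int → Int
  | 0, _, _, round, _, _ => round
  | fuel + 1, i, coin, round, avail, res =>
    if i ≤ n then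
      let round := round + 1
      let res := res ++ PySem.List.slice cards (some i) (some (min (i + 2) n))
      match (comb2 avail).find? (fun p => p.1 + p.2 == t) with
      | some (x, y) => loopA n t cards fuel (i + 2) coin round (rmF (rmF avail x) y) res
      | none =>
        if ¬ (1 ≤ coin) then round
        else
          match avail.find? (fun c => res.contains (t - c)) with
          | some c => loopA n t cards fuel (i + 2) (coin - 1) round (rmF avail c) (rmF res (t - c))
          | none =>
            if ¬ (2 ≤ coin) then round
            else
              match (comb2 res).find? (fun p => p.1 + p.2 == t) with
              | some (x, y) => loopA n t cards fuel (i + 2) (coin - 2) round avail (rmF (rmF res x) y)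
              | none => round
    else round

def solution (coin : Int) (cards : List Int) : Int :=
  let n : Int := cards.length
  let i := PySem.Int.floordiv n 3
  loopA n (n + 1) cards (cards.length + 2) i coin 0 (PySem.List.slice cards none (some i)) []

-- ===== PORT B =====
-- counts = {}; for c in lst: counts[c] = counts.get(c, 0) + 1
def buildCounts (l : List Int) : PySem.Dict Int Int :=
  l.foldl (fun d c => d.insert c (d.getD c 0 + 1)) PySem.Dict.empty

-- the scanning loop of _match_index: counts[c] -= 1; complement lookup in the suffix
def matchGo (t : Int) : List Int → PySem.Dict Int Int → Int → Option Int
  | [], _, _ => none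
  | c :: rest, d, j =>
    let d' := d.modify c 0 (· - 1)
    if d'.getD (t - c) 0 > 0 then some j else matchGo t rest d' (j + 1)

def matchIdx (l : List Int) (t : Int) : Option Int := matchGo t l (buildCounts l) 0

-- the enumerate scan of the one-coin step: first j with t - available[j] in rset
def scanGo (t : Int) (rset : List Int) : List Int → Int → Option Int
  | [], _ => none
  | c :: rest, j => if rset.contains (t - c) then some j else scanGo t rset rest (j + 1)

-- l.pop(j) (the .getD fallback is unreachable: j is always a valid index here)
def popAt (l : List Int) (j : Int) : Int × List Int := (PySem.List.pop? l j).getD (0, l)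

def loopB (n t : Int) (cards : List Int) : Nat → Int → Int → Int → List Int → List Int → Int
  | 0, _, _, round, _, _ => round
  | fuel + 1, i, coin, round, avail, res =>
    if i ≤ n then
      let round := round + 1
      let res := res ++ PySem.List.slice cards (some i) (some (i + 2))
      match matchIdx avail t with
      | some j =>
        let p := popAt avail j
        loopB n t cards fuel (i + 2) coin round (rmF p.2 (t - p.1)) res
      | none =>
        if coin < 1 then round
        else
          match scanGo t (PySem.Set.ofList res) avail 0 with
          | some j =>
            let p := popAt avail j
            loopB n t cards fuel (i + 2) (coin - 1) round p.2 (rmF res (t - p.1))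
          | none =>
            if coin < 2 then round
            else
              match matchIdx res t with
              | some j =>
                let p := popAt res j
                loopB n t cards fuel (i + 2) (coin - 2) round avail (rmF p.2 (t - p.1))
              | none => round
    else round

def solution_alt (coin : Int) (cards : List Int) : Int :=
  let n : Int := cards.length
  let i := PySem.Int.floordiv n 3
  loopB n (n + 1) cards (cards.length + 2) i coin 0 (PySem.List.slice cards none (some i)) []

-- ===== PRECONDITION & SPEC =====
def Spec_solution (coin : Int) (cards : List Int) (out : Int) : Prop := out = solution_alt coin cards
instance (coin : Int) (cards : List Int) (out : Int) : Decidable (Spec_solution coin cards out) := by unfold Spec_solution; infer_instance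

-- ===== CLAIM (what is proved, stated in full; the proofs are below) =====
def Claim_equal_solution : Prop := ∀ (coin : Int) (cards : List Int), Dom_solution coin cards → Spec_solution coin cards (solution coin cards)

-- ===== LEMMAS AND PROOFS =====

-- clean specification of _match_index: first index whose complement occurs later
def findSpecN (t : Int) : List Int → Option Nat
  | [] => none
  | x :: xs => if (t - x) ∈ xs then some 0 else (findSpecN t xs).map (· + 1)

theorem findSpecN_lt {t : Int} : ∀ {l : List Int} {k : Nat}, findSpecN t l = some k → k < l.length := by
  intro l
  induction l with
  | nil => intro k h; simp [findSpecN] at h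
  | cons x xs ih =>
    intro k h
    by_cases hm : (t - x) ∈ xs
    · simp [findSpecN, hm] at h
      simp only [List.length_cons]
      omega
    · simp [findSpecN, hm] at h
      obtain ⟨k', hk', rfl⟩ := h
      have := ih hk'
      simp only [List.length_cons]
      omega

theorem matchGo_eq (t : Int) : ∀ (l : List Int) (d : PySem.Dict Int Int) (j : Int),
    (∀ v, d.getD v 0 = (l.count v : Int)) →
    matchGo t l d j = (findSpecN t l).map (fun (k : Nat) => j + (k : Int)) := by
  intro l
  induction l with
  | nil => intro d j _; simp [matchGo, findSpecN]
  | cons c rest ih =>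
    intro d j hd
    have hd' : ∀ v, (d.modify c 0 (· - 1)).getD v 0 = (rest.count v : Int) := by
      intro v
      by_cases hv : v = c
      · subst hv
        rw [PySem.Dict.getD_modify_self, hd]
        simp [List.count_cons]
      · have hv2 : ¬ c = v := fun h => hv h.symm
        rw [PySem.Dict.getD_modify_of_ne d 0 (fun x => x - 1) hv, hd]
        simp [List.count_cons, hv, hv2]
    have hcond : ((d.modify c 0 (· - 1)).getD (t - c) 0 > 0) ↔ (t - c) ∈ rest := by
      rw [hd' (t - c)]
      constructor
      · intro h
        have : 0 < rest.count (t - c) := by exact_mod_cast h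
        exact List.count_pos_iff.mp this
      · intro h
        have : 0 < rest.count (t - c) := List.count_pos_iff.mpr h
        exact_mod_cast this
    by_cases hm : (t - c) ∈ rest
    · simp [matchGo, findSpecN, hm, hcond.mpr hm]
    · have hc : ¬ ((d.modify c 0 (· - 1)).getD (t - c) 0 > 0) := fun h => hm (hcond.mp h)
      simp only [matchGo, findSpecN, if_neg hc, if_neg hm]
      rw [ih _ (j + 1) hd']
      cases findSpecN t rest with
      | none => simp
      | some k => simp; push_cast; ring

theorem buildCounts_getD (l : List Int) (v : Int) : (buildCounts l).getD v 0 = (l.count v : Int) := by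
  unfold buildCounts
  rw [PySem.Dict.getD_foldl_insert_add_one]
  simp

theorem matchIdx_eq (l : List Int) (t : Int) :
    matchIdx l t = (findSpecN t l).map (fun (k : Nat) => (k : Int)) := by
  unfold matchIdx
  rw [matchGo_eq t l _ 0 (buildCounts_getD l)]
  cases findSpecN t l <;> simp

theorem rmF_cons_of_ne {x v : Int} (h : x ≠ v) (xs : List Int) : rmF (x :: xs) v = x :: rmF xs v := by
  unfold rmF
  rw [PySem.List.remove?_cons_of_ne xs h]
  cases PySem.List.remove? xs v <;> simp

theorem mem_comb2 : ∀ {l : List Int} {p : Int × Int}, p ∈ comb2 l → p.1 ∈ l ∧ p.2 ∈ l := by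
  intro l
  induction l with
  | nil => intro p h; simp [comb2] at h
  | cons x xs ih =>
    intro p h
    simp [comb2] at h
    rcases h with ⟨y, hy, rfl⟩ | h
    · exact ⟨by simp, by simp [hy]⟩
    · obtain ⟨h1, h2⟩ := ih h
      exact ⟨by simp [h1], by simp [h2]⟩

theorem find?_beq_mem {v : Int} : ∀ {xs : List Int}, v ∈ xs → xs.find? (· == v) = some v := by
  intro xs
  induction xs with
  | nil => intro h; simp at h
  | cons x xs ih =>
    intro h
    by_cases hx : x = v
    · subst hx; simp
    · rw [List.find?_cons_of_neg (by simp [hx])]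
      exact ih (by simpa [Ne.symm hx] using h)

-- step 1 / step 3: A's combinations-scan-and-remove equals B's hash-scan spec
theorem key1 (t : Int) : ∀ (l : List Int),
    ((comb2 l).find? (fun p => p.1 + p.2 == t)).map (fun p => rmF (rmF l p.1) p.2)
      = (findSpecN t l).map (fun (k : Nat) => rmF (l.eraseIdx k) (t - l.getD k 0)) := by
  intro l
  induction l with
  | nil => simp [comb2, findSpecN]
  | cons x xs ih =>
    have hfn : ((fun p : Int × Int => p.1 + p.2 == t) ∘ fun y => (x, y)) = (fun y => y == (t - x)) := by
      funext y
      by_cases h : x + y = t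
      · have : y = t - x := by omega
        simp [Function.comp, h, this]
      · have : ¬ (y = t - x) := by omega
        simp [Function.comp, h, this]
    by_cases hm : (t - x) ∈ xs
    · -- the head pairs with a later element
      have hfind : (xs.map (fun y => (x, y))).find? (fun p => p.1 + p.2 == t) = some (x, t - x) := by
        rw [List.find?_map, hfn, find?_beq_mem hm]
        rfl
      have hall : (comb2 (x :: xs)).find? (fun p => p.1 + p.2 == t) = some (x, t - x) := by
        simp only [comb2, List.find?_append, hfind, Option.some_or]
      rw [hall]
      simp [findSpecN, hm, rmF, List.eraseIdx]
    · -- no pair with the head: both sides recurse into xs, prepending x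
      have hnone : xs.find? (fun y => y == (t - x)) = none :=
        List.find?_eq_none.mpr (fun y hy hbeq => by
          have : y = t - x := by simpa using hbeq
          exact hm (by rwa [this] at hy))
      have hfind : (xs.map (fun y => (x, y))).find? (fun p => p.1 + p.2 == t) = none := by
        rw [List.find?_map, hfn, hnone]
        rfl
      have hc : (comb2 (x :: xs)).find? (fun p => p.1 + p.2 == t)
          = (comb2 xs).find? (fun p => p.1 + p.2 == t) := by
        simp only [comb2, List.find?_append, hfind, Option.none_or]
      rw [hc]
      simp only [findSpecN, if_neg hm]
      cases hfs : findSpecN t xs with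
      | none =>
        have hcf : (comb2 xs).find? (fun p => p.1 + p.2 == t) = none := by
          cases hcf : (comb2 xs).find? (fun p => p.1 + p.2 == t) with
          | none => rfl
          | some p =>
            exfalso
            have h2 := ih
            rw [hcf, hfs] at h2
            simp at h2
        rw [hcf]; simp
      | some k =>
        have hklt : k < xs.length := findSpecN_lt hfs
        cases hcf : (comb2 xs).find? (fun p => p.1 + p.2 == t) with
        | none =>
          exfalso
          have h2 := ih
          rw [hcf, hfs] at h2
          simp at h2
        | some p =>
          have h2 := ih
          rw [hcf, hfs] at h2
          simp only [Option.map_some, Option.some.injEq] at h2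
          have hp := List.find?_some hcf
          have hpm := mem_comb2 (List.mem_of_find?_eq_some hcf)
          have hsum : p.1 + p.2 = t := by simpa using hp
          have hp1 : p.1 ≠ x := fun h =>
            hm (by rw [show t - x = p.2 by omega]; exact hpm.2)
          have hp2 : p.2 ≠ x := fun h =>
            hm (by rw [show t - x = p.1 by omega]; exact hpm.1)
          have hcval : xs.getD k 0 ∈ xs := by
            rw [List.getD_eq_getElem xs 0 hklt]
            exact List.getElem_mem hklt
          have hcx : t - xs.getD k 0 ≠ x := fun h =>
            hm (by rw [show t - x = xs.getD k 0 by omega]; exact hcval)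
          simp only [Option.map_some, Option.some.injEq]
          rw [rmF_cons_of_ne (fun h => hp1 h.symm), rmF_cons_of_ne (fun h => hp2 h.symm), h2]
          rw [show (x :: xs).eraseIdx (k + 1) = x :: xs.eraseIdx k from rfl]
          rw [show (x :: xs).getD (k + 1) 0 = xs.getD k 0 from rfl]
          rw [rmF_cons_of_ne (fun h => hcx h.symm)]

theorem scanGo_eq (t : Int) (rset : List Int) : ∀ (l : List Int) (j : Int),
    scanGo t rset l j = (l.findIdx? (fun c => rset.contains (t - c))).map (fun (k : Nat) => j + (k : Int)) := by
  intro l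
  induction l with
  | nil => intro j; simp [scanGo]
  | cons c rest ih =>
    intro j
    rw [List.findIdx?_cons]
    by_cases hq : rset.contains (t - c)
    · have hm : t - c ∈ rset := by simpa using hq
      simp [scanGo, hq, hm]
    · have hm : t - c ∉ rset := by simpa using hq
      simp only [scanGo, if_neg hq, hq, Bool.false_eq_true, if_false]
      rw [ih (j + 1)]
      cases rest.findIdx? (fun c => rset.contains (t - c)) with
      | none => simp
      | some k => simp; ring

-- first-match scan: find?-then-remove-first-occurrence equals findIdx?-then-pop
theorem find?_vs_findIdx? (q : Int → Bool) : ∀ (l : List Int),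
    (l.find? q).map (fun c => (rmF l c, c))
      = (l.findIdx? q).map (fun (k : Nat) => ((popAt l (k : Int)).2, (popAt l (k : Int)).1)) := by
  intro l
  induction l with
  | nil => simp
  | cons x xs ih =>
    rw [List.findIdx?_cons]
    by_cases hq : q x
    · simp only [List.find?_cons_of_pos hq, if_pos hq]
      simp [popAt, PySem.List.pop?_zero_cons, rmF]
    · simp only [List.find?_cons_of_neg hq, if_neg hq]
      cases hfi : xs.findIdx? q with
      | none =>
        have : xs.find? q = none := by
          cases hcf : xs.find? q with
          | none => rfl
          | some c => exfalso; have h2 := ih; rw [hcf, hfi] at h2; simp at h2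
        rw [this]; simp
      | some k =>
        have hklt : k < xs.length := by
          have := List.findIdx?_eq_some_iff_findIdx_eq.mp hfi
          omega
        cases hcf : xs.find? q with
        | none => exfalso; have h2 := ih; rw [hcf, hfi] at h2; simp at h2
        | some c =>
          have h2 := ih
          rw [hcf, hfi] at h2
          simp only [Option.map_some, Option.some.injEq, Prod.mk.injEq] at h2
          have hqc : q c := List.find?_some hcf
          have hcx : c ≠ x := fun h => hq (h ▸ hqc)
          simp only [Option.map_some, Option.some.injEq, Prod.mk.injEq]
          have hpop : popAt (x :: xs) (((k + 1 : Nat) : Int)) = (xs[k], x :: xs.eraseIdx k) := by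
            unfold popAt
            rw [PySem.List.pop?_natCast _ (k + 1) (by simpa using Nat.succ_lt_succ hklt)]
            simp
          have hpop' : popAt xs (k : Int) = (xs[k], xs.eraseIdx k) := by
            unfold popAt
            rw [PySem.List.pop?_natCast _ k hklt]
            simp
          rw [hpop' ] at h2
          constructor
          · rw [rmF_cons_of_ne (fun h => hcx h.symm), h2.1, hpop]
          · rw [h2.2, hpop]

-- the slice cards[i:min(i+2,n)] equals cards[i:i+2] when n = len(cards)
theorem slice_min_eq (xs : List Int) (i : Int) (hi : 0 ≤ i) :
    PySem.List.slice xs (some i) (some (min (i + 2) (xs.length : Int)))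
      = PySem.List.slice xs (some i) (some (i + 2)) := by
  obtain ⟨a, rfl⟩ := Int.eq_ofNat_of_zero_le hi
  rcases le_or_gt ((a : Int) + 2) (xs.length : Int) with h | h
  · rw [min_eq_left h]
  · rw [min_eq_right (le_of_lt h)]
    rw [show ((a : Int) + 2) = (((a + 2 : Nat) : Int)) by push_cast; ring]
    rw [show ((xs.length : Int)) = (((xs.length : Nat) : Int)) from rfl]
    rw [PySem.List.slice_natCast, PySem.List.slice_natCast]
    have hlt : xs.length < a + 2 := by exact_mod_cast h
    rw [List.take_of_length_le (by simp), List.take_of_length_le (by simp; omega)]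

-- the one-coin predicates of A (list membership) and B (set membership) coincide
theorem pred_eq (t : Int) (res : List Int) :
    (fun c => List.contains (PySem.Set.ofList res) (t - c)) = (fun c => res.contains (t - c)) := by
  funext c
  by_cases h : (t - c) ∈ res
  · simp [h, (PySem.Set.mem_ofList res (t - c)).mpr h]
  · simp [h, PySem.Set.mem_ofList]

theorem loop_eq (n t : Int) (cards : List Int) (hn : n = (cards.length : Int)) :
    ∀ (fuel : Nat) (i coin round : Int) (avail res : List Int), 0 ≤ i →
      loopA n t cards fuel i coin round avail res = loopB n t cards fuel i coin round avail res := by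
  intro fuel
  induction fuel with
  | zero => intro i coin round avail res _; rfl
  | succ fuel ih =>
    intro i coin round avail res hi
    by_cases hin : i ≤ n
    · rw [show loopA n t cards (fuel + 1) i coin round avail res = loopA n t cards (fuel + 1) i coin round avail res from rfl]
      simp only [loopA, loopB, if_pos hin]
      rw [hn, slice_min_eq cards i hi, ← hn]
      set res' := res ++ PySem.List.slice cards (some i) (some (i + 2)) with hres'
      -- step 1
      rw [matchIdx_eq]
      cases hfs : findSpecN t avail with
      | some k =>
        have hklt : k < avail.length := findSpecN_lt hfs
        have h1 := key1 t avail
        rw [hfs] at h1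
        cases hcf : (comb2 avail).find? (fun p => p.1 + p.2 == t) with
        | none => exfalso; rw [hcf] at h1; simp at h1
        | some p =>
          rw [hcf] at h1
          simp only [Option.map_some, Option.some.injEq] at h1
          simp only [Option.map_some]
          have hpop : popAt avail (k : Int) = (avail[k], avail.eraseIdx k) := by
            unfold popAt
            rw [PySem.List.pop?_natCast _ k hklt]
            simp
          rw [hpop, h1]
          rw [show avail.getD k 0 = avail[k] from List.getD_eq_getElem avail 0 hklt]
          exact ih _ _ _ _ _ (by omega)
      | none =>
        have h1 := key1 t avail
        rw [hfs] at h1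
        have hcf : (comb2 avail).find? (fun p => p.1 + p.2 == t) = none := by
          cases hcf : (comb2 avail).find? (fun p => p.1 + p.2 == t) with
          | none => rfl
          | some p => exfalso; rw [hcf] at h1; simp at h1
        rw [hcf]
        simp only [Option.map_none]
        -- coin guards
        by_cases hc1 : (1 : Int) ≤ coin
        · rw [if_neg (by omega : ¬ coin < 1), if_neg (not_not_intro hc1)]
          -- step 2
          rw [scanGo_eq, pred_eq]
          have h2 := find?_vs_findIdx? (fun c => res'.contains (t - c)) avail
          cases hfi : avail.findIdx? (fun c => res'.contains (t - c)) with
          | none =>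
            have hcf2 : avail.find? (fun c => res'.contains (t - c)) = none := by
              cases hcf2 : avail.find? (fun c => res'.contains (t - c)) with
              | none => rfl
              | some c => exfalso; rw [hcf2, hfi] at h2; simp at h2
            rw [hcf2]
            simp only [Option.map_none]
            by_cases hc2 : (2 : Int) ≤ coin
            · rw [if_neg (by omega : ¬ coin < 2), if_neg (not_not_intro hc2)]
              -- step 3
              rw [matchIdx_eq]
              cases hfs3 : findSpecN t res' with
              | some k =>
                have hklt : k < res'.length := findSpecN_lt hfs3
                have h3 := key1 t res'
                rw [hfs3] at h3
                cases hcf3 : (comb2 res').find? (fun p => p.1 + p.2 == t) with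
                | none => exfalso; rw [hcf3] at h3; simp at h3
                | some p =>
                  rw [hcf3] at h3
                  simp only [Option.map_some, Option.some.injEq] at h3
                  simp only [Option.map_some]
                  have hpop : popAt res' (k : Int) = (res'[k], res'.eraseIdx k) := by
                    unfold popAt
                    rw [PySem.List.pop?_natCast _ k hklt]
                    simp
                  rw [hpop, h3]
                  rw [show res'.getD k 0 = res'[k] from List.getD_eq_getElem res' 0 hklt]
                  exact ih _ _ _ _ _ (by omega)
              | none =>
                have h3 := key1 t res'
                rw [hfs3] at h3
                have hcf3 : (comb2 res').find? (fun p => p.1 + p.2 == t) = none := by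
                  cases hcf3 : (comb2 res').find? (fun p => p.1 + p.2 == t) with
                  | none => rfl
                  | some p => exfalso; rw [hcf3] at h3; simp at h3
                rw [hcf3]
                simp
            · rw [if_pos (by omega : coin < 2), if_pos (by omega : ¬ (2 : Int) ≤ coin)]
          | some k =>
            cases hcf2 : avail.find? (fun c => res'.contains (t - c)) with
            | none => exfalso; rw [hcf2, hfi] at h2; simp at h2
            | some c =>
              rw [hcf2, hfi] at h2
              simp only [Option.map_some, Option.some.injEq, Prod.mk.injEq] at h2
              simp only [Option.map_some, zero_add]
              rw [← h2.1, ← h2.2]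
              exact ih _ _ _ _ _ (by omega)
        · rw [if_pos (by omega : coin < 1), if_pos (by omega : ¬ (1 : Int) ≤ coin)]
    · simp only [loopA, loopB, if_neg hin]

-- ===== VERDICT (by name: the statement is the Claim_ definition above) =====
theorem solution_spec : Claim_equal_solution := by
  unfold Claim_equal_solution Spec_solution
  intro coin cards _
  unfold solution solution_alt
  apply loop_eq _ _ _ rfl
  rw [PySem.Int.floordiv_eq_ediv_of_pos (by omega)]
  exact Int.ediv_nonneg (by positivity) (by omega)
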